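-- pv_equiv track=rewrite | github.com/itCsn/Cuarta-PC | bic01w-quinto-laboratorio-itCsn/sustitucion.py | construir_diccionario_sustitucion
-- ===== SOURCE A (Python) =====
-- VOCALES_MINUSCULAS = "aeiou"
--
-- VOCALES_MAYUSCULAS = "AEIOU"
--
-- def construir_diccionario_sustitucion(permutacion_vocales):
--     """
--
--     Genera un diccionario donde, de acuerdo permutacion_vocales, las claves son las letras del
--     mensaje original y los valores son los valores encriptados de cada letra.
--     Solo deben sustituirse las vocales de acuerdo a permutacion_vocales, las consonantes no deben
--     ser sustituidas.
--
--     :param permutacion_vocales: Cadena de caracteres, con una permutación de vocales. El orden de las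
--     vocales en la permutacion define la sustitucion de vocales en el diccionario resultante.
--     :return: Diccionario, con claves para letras mayusculas y minusculas.
--     """
--     abcdario = "aAbBcCdDeEfFgGhHiIjJkKlLmMnNoOpPqQrRsStTuUvVwWxXyYzZ"
--     diccionario_letras = {}
--     lista_vocales_permutadas = list(permutacion_vocales)
--     lista_vocalesi_mayusculas_permutadas = list(permutacion_vocales.upper())
--     lista_vocales = list(VOCALES_MINUSCULAS)
--     lista_vocales_mayusculas = list(VOCALES_MAYUSCULAS)
--
--     for i in abcdario:
--         if i in VOCALES_MINUSCULAS:
--             j = lista_vocales.index(i)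
--             diccionario_letras[i] = lista_vocales_permutadas[j]
--         elif i in VOCALES_MAYUSCULAS:
--             j = lista_vocales_mayusculas.index(i)
--             diccionario_letras[i] = lista_vocalesi_mayusculas_permutadas[j]
--         else:
--             diccionario_letras[i] = i
--
--     return diccionario_letras
-- ===== SOURCE B (Python) =====
-- VOCALES_MINUSCULAS = "aeiou"
--
-- VOCALES_MAYUSCULAS = "AEIOU"
--
-- def construir_diccionario_sustitucion(permutacion_vocales):
--     abcdario = "aAbBcCdDeEfFgGhHiIjJkKlLmMnNoOpPqQrRsStTuUvVwWxXyYzZ"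
--     diccionario = {letra: letra for letra in abcdario}
--     permutacion_mayusculas = permutacion_vocales.upper()
--     for i, (minuscula, mayuscula) in enumerate(zip(VOCALES_MINUSCULAS, VOCALES_MAYUSCULAS)):
--         diccionario[minuscula] = permutacion_vocales[i]
--         diccionario[mayuscula] = permutacion_mayusculas[i]
--     return diccionario
-- ===== Notes on version B (the rewrite author's own statement) =====
-- stated objective: simpler
-- what changed: B builds an identity dict over the whole alphabet with a comprehension and then overwrites only the ten vowel entries in a short enumerate(zip(...)) pass, removing A's per-character three-way membership/index branch and A's two list(...) materializations of the permutation.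
import Mathlib
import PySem

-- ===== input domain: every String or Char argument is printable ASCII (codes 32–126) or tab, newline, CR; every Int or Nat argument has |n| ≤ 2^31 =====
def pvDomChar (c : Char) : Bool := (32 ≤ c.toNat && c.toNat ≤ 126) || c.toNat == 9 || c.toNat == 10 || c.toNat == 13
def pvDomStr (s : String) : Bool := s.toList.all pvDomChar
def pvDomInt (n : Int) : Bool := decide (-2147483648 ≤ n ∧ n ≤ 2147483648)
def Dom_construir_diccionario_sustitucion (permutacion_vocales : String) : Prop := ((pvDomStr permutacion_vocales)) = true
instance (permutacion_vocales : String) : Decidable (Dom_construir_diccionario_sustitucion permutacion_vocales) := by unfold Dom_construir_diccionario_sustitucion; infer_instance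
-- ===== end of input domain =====

set_option maxRecDepth 10000


-- B replaces A's per-character three-way membership/index branch by an identity table built in one
-- comprehension plus a short overwrite pass over the five vowel pairs (objective: simpler).

-- ===== PORT A =====

-- a Python 1-character string (element of list(s), or s[i])
def pvSingleton (c : Char) : String := String.ofList [c]

-- the body of A's `for i in abcdario` loop (IndexError branches return d unchanged; they are
-- unreachable under Pre_, which demands len(permutacion_vocales) ≥ 5)
def pvStepA (lvp lvmp lv lvM : List String) (d : PySem.Dict String String) (c : Char) :
    PySem.Dict String String :=
  let i : String := pvSingleton c
  if PySem.Str.isIn i "aeiou" then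
    match PySem.List.index? lv i with
    | some j =>
      match PySem.List.pyGet? lvp (j : Int) with
      | some v => d.insert i v
      | none => d
    | none => d
  else if PySem.Str.isIn i "AEIOU" then
    match PySem.List.index? lvM i with
    | some j =>
      match PySem.List.pyGet? lvmp (j : Int) with
      | some v => d.insert i v
      | none => d
    | none => d
  else d.insert i i

def construir_diccionario_sustitucion (permutacion_vocales : String) : List (String × String) :=
  let abcdario : String := "aAbBcCdDeEfFgGhHiIjJkKlLmMnNoOpPqQrRsStTuUvVwWxXyYzZ"
  let lista_vocales_permutadas : List String := permutacion_vocales.toList.map pvSingleton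
  let lista_vocalesi_mayusculas_permutadas : List String :=
    (PySem.Str.upper permutacion_vocales).toList.map pvSingleton
  let lista_vocales : List String := ("aeiou" : String).toList.map pvSingleton
  let lista_vocales_mayusculas : List String := ("AEIOU" : String).toList.map pvSingleton
  (abcdario.toList.foldl
    (pvStepA lista_vocales_permutadas lista_vocalesi_mayusculas_permutadas
      lista_vocales lista_vocales_mayusculas)
    PySem.Dict.empty).items

-- ===== PORT B =====

-- the body of B's `for i, (minuscula, mayuscula) in enumerate(zip(...))` loop
-- (IndexError branches return d unchanged; unreachable under Pre_)
def pvStepB (p pm : String) (d : PySem.Dict String String) (x : Int × Char × Char) :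
    PySem.Dict String String :=
  let d' := match PySem.Str.pyGet? p x.1 with
    | some v => d.insert (pvSingleton x.2.1) (pvSingleton v)
    | none => d
  match PySem.Str.pyGet? pm x.1 with
  | some v => d'.insert (pvSingleton x.2.2) (pvSingleton v)
  | none => d'

def construir_diccionario_sustitucion_alt (permutacion_vocales : String) : List (String × String) :=
  let abcdario : String := "aAbBcCdDeEfFgGhHiIjJkKlLmMnNoOpPqQrRsStTuUvVwWxXyYzZ"
  let diccionario : PySem.Dict String String :=
    abcdario.toList.foldl (fun d c => d.insert (pvSingleton c) (pvSingleton c)) PySem.Dict.empty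
  let permutacion_mayusculas : String := PySem.Str.upper permutacion_vocales
  ((PySem.List.enumerate (List.zip ("aeiou" : String).toList ("AEIOU" : String).toList)).foldl
    (pvStepB permutacion_vocales permutacion_mayusculas) diccionario).items

-- ===== PRECONDITION & SPEC =====
-- Pre_ excludes permutations shorter than 5 characters: there A (and B) raises IndexError when
-- indexing the permutation at a vowel position.
def Pre_construir_diccionario_sustitucion (permutacion_vocales : String) : Prop :=
  5 ≤ permutacion_vocales.toList.length
instance (permutacion_vocales : String) : Decidable (Pre_construir_diccionario_sustitucion permutacion_vocales) := by unfold Pre_construir_diccionario_sustitucion; infer_instance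

def pvWitness_construir_diccionario_sustitucion : String := "eioua"

def Spec_construir_diccionario_sustitucion (permutacion_vocales : String) (out : List (String × String)) : Prop := out = construir_diccionario_sustitucion_alt permutacion_vocales
instance (permutacion_vocales : String) (out : List (String × String)) : Decidable (Spec_construir_diccionario_sustitucion permutacion_vocales out) := by unfold Spec_construir_diccionario_sustitucion; infer_instance

-- ===== CLAIM (what is proved, stated in full; the proofs are below) =====
def Claim_equal_construir_diccionario_sustitucion : Prop := ∀ (permutacion_vocales : String), Dom_construir_diccionario_sustitucion permutacion_vocales → Pre_construir_diccionario_sustitucion permutacion_vocales → Spec_construir_diccionario_sustitucion permutacion_vocales (construir_diccionario_sustitucion permutacion_vocales)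

-- ===== LEMMAS AND PROOFS =====

def pvAbcL : List Char := ['a', 'A', 'b', 'B', 'c', 'C', 'd', 'D', 'e', 'E', 'f', 'F', 'g', 'G', 'h', 'H', 'i', 'I', 'j', 'J', 'k', 'K', 'l', 'L', 'm', 'M', 'n', 'N', 'o', 'O', 'p', 'P', 'q', 'Q', 'r', 'R', 's', 'S', 't', 'T', 'u', 'U', 'v', 'V', 'w', 'W', 'x', 'X', 'y', 'Y', 'z', 'Z']

theorem pvAbcToList :
    ("aAbBcCdDeEfFgGhHiIjJkKlLmMnNoOpPqQrRsStTuUvVwWxXyYzZ" : String).toList = pvAbcL := rfl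

-- the value the substitution table assigns to an alphabet character, given the first five
-- characters a b c d e of the permutation
def pvVal (a b c d e : Char) (ch : Char) : String :=
  if ch = 'a' then pvSingleton a
  else if ch = 'e' then pvSingleton b
  else if ch = 'i' then pvSingleton c
  else if ch = 'o' then pvSingleton d
  else if ch = 'u' then pvSingleton e
  else if ch = 'A' then pvSingleton (PySem.Chars.upperChar a)
  else if ch = 'E' then pvSingleton (PySem.Chars.upperChar b)
  else if ch = 'I' then pvSingleton (PySem.Chars.upperChar c)
  else if ch = 'O' then pvSingleton (PySem.Chars.upperChar d)
  else if ch = 'U' then pvSingleton (PySem.Chars.upperChar e)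
  else pvSingleton ch

-- A's loop body always inserts key pvSingleton ch with value pvVal … ch (length ≥ 5 input)
theorem pvStepA_eq (a b c d e : Char) (r : List Char) (acc : PySem.Dict String String)
    (ch : Char) (h : ch ∈ pvAbcL) :
    pvStepA ((a::b::c::d::e::r).map pvSingleton)
      ((PySem.Chars.upper (a::b::c::d::e::r)).map pvSingleton)
      ("aeiou".toList.map pvSingleton) ("AEIOU".toList.map pvSingleton) acc ch
    = acc.insert (pvSingleton ch) (pvVal a b c d e ch) := by
  have va : PySem.Str.isIn (pvSingleton 'a') "aeiou" = true := by decide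
  have ia : PySem.List.index? ("aeiou".toList.map pvSingleton) (pvSingleton 'a') = some 0 := by decide
  have ve : PySem.Str.isIn (pvSingleton 'e') "aeiou" = true := by decide
  have ie : PySem.List.index? ("aeiou".toList.map pvSingleton) (pvSingleton 'e') = some 1 := by decide
  have vi : PySem.Str.isIn (pvSingleton 'i') "aeiou" = true := by decide
  have ii : PySem.List.index? ("aeiou".toList.map pvSingleton) (pvSingleton 'i') = some 2 := by decide
  have vo : PySem.Str.isIn (pvSingleton 'o') "aeiou" = true := by decide
  have io : PySem.List.index? ("aeiou".toList.map pvSingleton) (pvSingleton 'o') = some 3 := by decide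
  have vu : PySem.Str.isIn (pvSingleton 'u') "aeiou" = true := by decide
  have iu : PySem.List.index? ("aeiou".toList.map pvSingleton) (pvSingleton 'u') = some 4 := by decide
  have fA : PySem.Str.isIn (pvSingleton 'A') "aeiou" = false := by decide
  have uA : PySem.Str.isIn (pvSingleton 'A') "AEIOU" = true := by decide
  have jA : PySem.List.index? ("AEIOU".toList.map pvSingleton) (pvSingleton 'A') = some 0 := by decide
  have fE : PySem.Str.isIn (pvSingleton 'E') "aeiou" = false := by decide
  have uE : PySem.Str.isIn (pvSingleton 'E') "AEIOU" = true := by decide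
  have jE : PySem.List.index? ("AEIOU".toList.map pvSingleton) (pvSingleton 'E') = some 1 := by decide
  have fI : PySem.Str.isIn (pvSingleton 'I') "aeiou" = false := by decide
  have uI : PySem.Str.isIn (pvSingleton 'I') "AEIOU" = true := by decide
  have jI : PySem.List.index? ("AEIOU".toList.map pvSingleton) (pvSingleton 'I') = some 2 := by decide
  have fO : PySem.Str.isIn (pvSingleton 'O') "aeiou" = false := by decide
  have uO : PySem.Str.isIn (pvSingleton 'O') "AEIOU" = true := by decide
  have jO : PySem.List.index? ("AEIOU".toList.map pvSingleton) (pvSingleton 'O') = some 3 := by decide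
  have fU : PySem.Str.isIn (pvSingleton 'U') "aeiou" = false := by decide
  have uU : PySem.Str.isIn (pvSingleton 'U') "AEIOU" = true := by decide
  have jU : PySem.List.index? ("AEIOU".toList.map pvSingleton) (pvSingleton 'U') = some 4 := by decide
  fin_cases h <;>
    first
      | rfl
      | (simp only [pvStepA, va, ia, ve, ie, vi, ii, vo, io, vu, iu, fA, uA, jA, fE, uE, jE, fI, uI, jI, fO, uO, jO, fU, uU, jU,
           Bool.false_eq_true, if_false, if_true, PySem.List.pyGet?_natCast,
           PySem.Chars.upper, List.map_cons]
         rfl)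

-- A's result, written as one map over the alphabet
theorem pvA_items (a b c d e : Char) (r : List Char) :
    construir_diccionario_sustitucion (String.ofList (a::b::c::d::e::r))
    = pvAbcL.map (fun ch => (pvSingleton ch, pvVal a b c d e ch)) := by
  simp only [construir_diccionario_sustitucion, String.toList_ofList, PySem.Str.toList_upper,
    pvAbcToList]
  rw [PySem.List.foldl_congr_mem _ _ _ _ (fun acc x hx => pvStepA_eq a b c d e r acc x hx)]
  rw [PySem.Dict.items_foldl_insert_fresh pvAbcL pvSingleton (pvVal a b c d e) PySem.Dict.empty
    (fun x _ => rfl) (by decide)]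
  rfl

-- B's identity table and its items/keys
def pvD0 : PySem.Dict String String :=
  ("aAbBcCdDeEfFgGhHiIjJkKlLmMnNoOpPqQrRsStTuUvVwWxXyYzZ" : String).toList.foldl (fun d c => d.insert (pvSingleton c) (pvSingleton c)) PySem.Dict.empty

theorem pvD0_items : pvD0.items = pvAbcL.map (fun ch => (pvSingleton ch, pvSingleton ch)) := by decide
theorem pvD0_keys : pvD0.keys = pvAbcL.map pvSingleton := by decide

theorem pvContains (dd : PySem.Dict String String) (hd : dd.keys = pvAbcL.map pvSingleton)
    (k : String) (hk : k ∈ pvAbcL.map pvSingleton) : dd.contains k = true := by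
  rw [PySem.Dict.contains_eq_decide_mem_keys, hd]; simpa using hk

theorem pvKeep (dd : PySem.Dict String String) (hd : dd.keys = pvAbcL.map pvSingleton)
    (k v : String) (hk : k ∈ pvAbcL.map pvSingleton) :
    (dd.insert k v).keys = pvAbcL.map pvSingleton := by
  rw [PySem.Dict.keys_insert_of_contains _ v (pvContains dd hd k hk), hd]

-- B's result, written as the same map over the alphabet
theorem pvB_items (a b c d e : Char) (r : List Char) :
    construir_diccionario_sustitucion_alt (String.ofList (a::b::c::d::e::r))
    = pvAbcL.map (fun ch => (pvSingleton ch, pvVal a b c d e ch)) := by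
  have henum : PySem.List.enumerate (List.zip ("aeiou" : String).toList ("AEIOU" : String).toList) =
      [(0, ('a', 'A')), (1, ('e', 'E')), (2, ('i', 'I')), (3, ('o', 'O')), (4, ('u', 'U'))] := by
    decide
  have g0 : PySem.Str.pyGet? (String.ofList (a::b::c::d::e::r)) 0 = some a := by
    simp [PySem.Str.pyGet?, PySem.List.pyGet?_of_nonneg]
  have h0 : PySem.Str.pyGet? (PySem.Str.upper (String.ofList (a::b::c::d::e::r))) 0
      = some (PySem.Chars.upperChar a) := by
    simp [PySem.Str.pyGet?, PySem.Str.toList_upper, PySem.Chars.upper, PySem.List.pyGet?_of_nonneg]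
  have g1 : PySem.Str.pyGet? (String.ofList (a::b::c::d::e::r)) 1 = some b := by
    simp [PySem.Str.pyGet?, PySem.List.pyGet?_of_nonneg]
  have h1 : PySem.Str.pyGet? (PySem.Str.upper (String.ofList (a::b::c::d::e::r))) 1
      = some (PySem.Chars.upperChar b) := by
    simp [PySem.Str.pyGet?, PySem.Str.toList_upper, PySem.Chars.upper, PySem.List.pyGet?_of_nonneg]
  have g2 : PySem.Str.pyGet? (String.ofList (a::b::c::d::e::r)) 2 = some c := by
    simp [PySem.Str.pyGet?, PySem.List.pyGet?_of_nonneg]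
  have h2 : PySem.Str.pyGet? (PySem.Str.upper (String.ofList (a::b::c::d::e::r))) 2
      = some (PySem.Chars.upperChar c) := by
    simp [PySem.Str.pyGet?, PySem.Str.toList_upper, PySem.Chars.upper, PySem.List.pyGet?_of_nonneg]
  have g3 : PySem.Str.pyGet? (String.ofList (a::b::c::d::e::r)) 3 = some d := by
    simp [PySem.Str.pyGet?, PySem.List.pyGet?_of_nonneg]
  have h3 : PySem.Str.pyGet? (PySem.Str.upper (String.ofList (a::b::c::d::e::r))) 3
      = some (PySem.Chars.upperChar d) := by
    simp [PySem.Str.pyGet?, PySem.Str.toList_upper, PySem.Chars.upper, PySem.List.pyGet?_of_nonneg]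
  have g4 : PySem.Str.pyGet? (String.ofList (a::b::c::d::e::r)) 4 = some e := by
    simp [PySem.Str.pyGet?, PySem.List.pyGet?_of_nonneg]
  have h4 : PySem.Str.pyGet? (PySem.Str.upper (String.ofList (a::b::c::d::e::r))) 4
      = some (PySem.Chars.upperChar e) := by
    simp [PySem.Str.pyGet?, PySem.Str.toList_upper, PySem.Chars.upper, PySem.List.pyGet?_of_nonneg]
  simp only [construir_diccionario_sustitucion_alt, henum, List.foldl_cons, List.foldl_nil,
    pvStepB, g0, h0, g1, h1, g2, h2, g3, h3, g4, h4]
  rw [show (("aAbBcCdDeEfFgGhHiIjJkKlLmMnNoOpPqQrRsStTuUvVwWxXyYzZ" : String).toList.foldl (fun d c => d.insert (pvSingleton c) (pvSingleton c)) PySem.Dict.empty) = pvD0 from rfl]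
  have mem : ∀ ch ∈ pvAbcL, pvSingleton ch ∈ pvAbcL.map pvSingleton := fun ch hch => List.mem_map_of_mem hch
  have c0 := pvContains _ pvD0_keys (pvSingleton 'a') (mem 'a' (by decide))
  have k0 := pvKeep _ pvD0_keys (pvSingleton 'a') (pvSingleton a) (mem 'a' (by decide))
  have c1 := pvContains _ k0 (pvSingleton 'A') (mem 'A' (by decide))
  have k1 := pvKeep _ k0 (pvSingleton 'A') (pvSingleton (PySem.Chars.upperChar a)) (mem 'A' (by decide))
  have c2 := pvContains _ k1 (pvSingleton 'e') (mem 'e' (by decide))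
  have k2 := pvKeep _ k1 (pvSingleton 'e') (pvSingleton b) (mem 'e' (by decide))
  have c3 := pvContains _ k2 (pvSingleton 'E') (mem 'E' (by decide))
  have k3 := pvKeep _ k2 (pvSingleton 'E') (pvSingleton (PySem.Chars.upperChar b)) (mem 'E' (by decide))
  have c4 := pvContains _ k3 (pvSingleton 'i') (mem 'i' (by decide))
  have k4 := pvKeep _ k3 (pvSingleton 'i') (pvSingleton c) (mem 'i' (by decide))
  have c5 := pvContains _ k4 (pvSingleton 'I') (mem 'I' (by decide))
  have k5 := pvKeep _ k4 (pvSingleton 'I') (pvSingleton (PySem.Chars.upperChar c)) (mem 'I' (by decide))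
  have c6 := pvContains _ k5 (pvSingleton 'o') (mem 'o' (by decide))
  have k6 := pvKeep _ k5 (pvSingleton 'o') (pvSingleton d) (mem 'o' (by decide))
  have c7 := pvContains _ k6 (pvSingleton 'O') (mem 'O' (by decide))
  have k7 := pvKeep _ k6 (pvSingleton 'O') (pvSingleton (PySem.Chars.upperChar d)) (mem 'O' (by decide))
  have c8 := pvContains _ k7 (pvSingleton 'u') (mem 'u' (by decide))
  have k8 := pvKeep _ k7 (pvSingleton 'u') (pvSingleton e) (mem 'u' (by decide))
  have c9 := pvContains _ k8 (pvSingleton 'U') (mem 'U' (by decide))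
  have k9 := pvKeep _ k8 (pvSingleton 'U') (pvSingleton (PySem.Chars.upperChar e)) (mem 'U' (by decide))
  rw [PySem.Dict.items_insert_of_contains _ _ c9, PySem.Dict.items_insert_of_contains _ _ c8, PySem.Dict.items_insert_of_contains _ _ c7, PySem.Dict.items_insert_of_contains _ _ c6, PySem.Dict.items_insert_of_contains _ _ c5, PySem.Dict.items_insert_of_contains _ _ c4, PySem.Dict.items_insert_of_contains _ _ c3, PySem.Dict.items_insert_of_contains _ _ c2, PySem.Dict.items_insert_of_contains _ _ c1, PySem.Dict.items_insert_of_contains _ _ c0]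
  rw [pvD0_items]
  simp only [List.map_map]
  refine List.map_congr_left ?_
  intro ch hch
  fin_cases hch <;> rfl

-- ===== VERDICT (by name: the statement is the Claim_ definition above) =====
theorem construir_diccionario_sustitucion_spec : Claim_equal_construir_diccionario_sustitucion := by
  intro p _ hpre
  unfold Spec_construir_diccionario_sustitucion
  have hp : String.ofList p.toList = p := by simp
  unfold Pre_construir_diccionario_sustitucion at hpre
  rcases hl : p.toList with _ | ⟨a, _ | ⟨b, _ | ⟨c, _ | ⟨d, _ | ⟨e, r⟩⟩⟩⟩⟩ <;>
    rw [hl] at hp hpre <;> try simp at hpre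
  rw [← hp, pvA_items, pvB_items]
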